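-- pv_equiv track=rewrite | github.com/RamananVr/Leetcodepython | strings_hashing/2168_Unique_Substrings_With_Equal_Digit_Frequency.py | equalDigitFrequency
-- ===== SOURCE A (Python) =====
-- from collections import Counter
--
-- def equalDigitFrequency(s: str) -> int:
--     """
--     Function to find the number of unique substrings where all digits have the same frequency.
--     """
--     unique_substrings = set()
--
--     # Iterate over all possible substrings
--     for i in range(len(s)):
--         freq = Counter()
--         for j in range(i, len(s)):
--             freq[s[j]] += 1
--             # Check if all frequencies are the same
--             if len(set(freq.values())) == 1:
--                 # Add the substring to the set
--                 unique_substrings.add(s[i:j+1])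
--
--     return len(unique_substrings)
-- ===== SOURCE B (Python) =====
-- def equalDigitFrequency(s: str) -> int:
--     # Different algorithm: instead of collecting substrings in a hash set, insert every
--     # substring into a flat trie keyed by (node, char); distinct substrings correspond
--     # one-to-one to trie nodes, so dedup is structural and no substring string is ever
--     # built or hashed.  "All frequencies equal" is tracked with a running maxf/distinct
--     # invariant (all equal iff maxf * distinct == window length).
--     n = len(s)
--     trie = {}        # (node, ch) -> child node id
--     nodes = 1        # node 0 is the root; fresh ids are allocated from `nodes`
--     valid = set()    # ids of nodes whose path spells a valid substring
--     for i in range(n):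
--         node = 0
--         counts = {}
--         maxf = 0
--         distinct = 0
--         for j in range(i, n):
--             ch = s[j]
--             v = counts.get(ch, 0) + 1
--             counts[ch] = v
--             if v == 1:
--                 distinct += 1
--             if v > maxf:
--                 maxf = v
--             nxt = trie.get((node, ch))
--             if nxt is None:
--                 nxt = nodes
--                 trie[(node, ch)] = nxt
--                 nodes += 1
--             node = nxt
--             if maxf * distinct == j - i + 1:
--                 valid.add(node)
--     return len(valid)
-- ===== Notes on version B (the rewrite author's own statement) =====
-- stated objective: alternative
-- what changed: Deduplication by hash-set of substring slices is replaced by a flat trie keyed by (node,char): each distinct substring corresponds to exactly one trie node, no substring is ever materialised or hashed, and the answer is the number of nodes marked valid; the all-equal check uses a running maxf*distinct == length invariant instead of rebuilding set(freq.values()).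
import Mathlib
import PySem

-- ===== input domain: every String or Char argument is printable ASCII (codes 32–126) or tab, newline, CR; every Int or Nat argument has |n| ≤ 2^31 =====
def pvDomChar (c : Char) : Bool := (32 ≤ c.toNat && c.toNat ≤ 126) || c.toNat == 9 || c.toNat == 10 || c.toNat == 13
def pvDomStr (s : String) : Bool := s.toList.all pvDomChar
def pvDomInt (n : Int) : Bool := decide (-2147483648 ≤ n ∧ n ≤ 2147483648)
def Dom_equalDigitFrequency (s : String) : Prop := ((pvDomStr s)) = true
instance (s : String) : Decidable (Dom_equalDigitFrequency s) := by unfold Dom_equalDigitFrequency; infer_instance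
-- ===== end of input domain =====

-- B deduplicates substrings structurally in a flat (node,char)-keyed trie (counting valid
-- node ids) instead of hashing substring slices into a set, and tracks the all-equal check
-- with a running maxf*distinct invariant; an alternative algorithm, not measured faster.


-- ===== PORT A =====
-- for i in range(len(s)): freq = Counter(); for j in range(i, len(s)): freq[s[j]] += 1;
-- if len(set(freq.values())) == 1: add s[i:j+1]; finally len(unique_substrings).
-- (the 'none' match arm is a totality guard only: j always lies in range, Python never raises here)
def pvAInner (s : String) (i : Int) (st : PySem.Dict Char Int × PySem.Set String) (j : Int) :
    PySem.Dict Char Int × PySem.Set String :=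
  match PySem.Str.pyGet? s j with
  | none => st
  | some c =>
    let freq := st.1.insert c (st.1.getD c 0 + 1)
    if (PySem.Set.ofList freq.values).length == 1 then
      (freq, st.2.add (PySem.Str.slice s (some i) (some (j + 1))))
    else
      (freq, st.2)

def equalDigitFrequency (s : String) : Int :=
  let n : Int := PySem.Str.len s
  let uset : PySem.Set String :=
    (PySem.List.pyRange 0 n).foldl (fun uset i =>
      ((PySem.List.pyRange i n).foldl (pvAInner s i) (PySem.Dict.empty, uset)).2)
      PySem.Set.empty
  (uset.length : Int)

-- ===== PORT B =====
-- trie = {} keyed by (node, ch); nodes = 1; valid = set of node ids.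
-- for i in range(n): node = 0; counts = {}; maxf = distinct = 0;
--   for j in range(i, n): ch = s[j]; v = counts.get(ch,0)+1; counts[ch] = v;
--     update distinct/maxf; nxt = trie.get((node,ch)); if None: nxt = nodes;
--     trie[(node,ch)] = nxt; nodes += 1; node = nxt;
--     if maxf*distinct == j-i+1: valid.add(node); finally len(valid).
-- state st = (counts, maxf, distinct, trie, nodes, valid, node)
def pvBInner (s : String) (i : Int)
    (st : PySem.Dict Char Int × Int × Int × PySem.Dict (Int × Char) Int × Int × PySem.Set Int × Int)
    (j : Int) :
    PySem.Dict Char Int × Int × Int × PySem.Dict (Int × Char) Int × Int × PySem.Set Int × Int :=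
  match PySem.Str.pyGet? s j with
  | none => st
  | some ch =>
    let v := st.1.getD ch 0 + 1
    let counts := st.1.insert ch v
    let distinct := if v == 1 then st.2.2.1 + 1 else st.2.2.1
    let maxf := if st.2.1 < v then v else st.2.1
    match st.2.2.2.1.get? (st.2.2.2.2.2.2, ch) with
    | some nxt =>
      if maxf * distinct == j - i + 1 then
        (counts, maxf, distinct, st.2.2.2.1, st.2.2.2.2.1, st.2.2.2.2.2.1.add nxt, nxt)
      else
        (counts, maxf, distinct, st.2.2.2.1, st.2.2.2.2.1, st.2.2.2.2.2.1, nxt)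
    | none =>
      let nxt := st.2.2.2.2.1
      let trie := st.2.2.2.1.insert (st.2.2.2.2.2.2, ch) nxt
      if maxf * distinct == j - i + 1 then
        (counts, maxf, distinct, trie, nxt + 1, st.2.2.2.2.2.1.add nxt, nxt)
      else
        (counts, maxf, distinct, trie, nxt + 1, st.2.2.2.2.2.1, nxt)

def pvBOuter (s : String) (n : Int)
    (ost : PySem.Dict (Int × Char) Int × Int × PySem.Set Int) (i : Int) :
    PySem.Dict (Int × Char) Int × Int × PySem.Set Int :=
  let r := (PySem.List.pyRange i n).foldl (pvBInner s i)
    (PySem.Dict.empty, 0, 0, ost.1, ost.2.1, ost.2.2, 0)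
  (r.2.2.2.1, r.2.2.2.2.1, r.2.2.2.2.2.1)

def equalDigitFrequency_alt (s : String) : Int :=
  let n : Int := PySem.Str.len s
  let fin := (PySem.List.pyRange 0 n).foldl (pvBOuter s n)
    (PySem.Dict.empty, 1, PySem.Set.empty)
  (fin.2.2.length : Int)

-- ===== PRECONDITION & SPEC =====
def Spec_equalDigitFrequency (s : String) (out : Int) : Prop := out = equalDigitFrequency_alt s
instance (s : String) (out : Int) : Decidable (Spec_equalDigitFrequency s out) := by unfold Spec_equalDigitFrequency; infer_instance

-- ===== CLAIM (what is proved, stated in full; the proofs are below) =====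
def Claim_equal_equalDigitFrequency : Prop := ∀ (s : String), Dom_equalDigitFrequency s → Spec_equalDigitFrequency s (equalDigitFrequency s)

-- ===== LEMMAS AND PROOFS =====

-- the running maximum B maintains: max count over the distinct chars of t
def pvMv (t : List Char) : Int :=
  ((PySem.Set.ofList t).map (fun k => ((t.count k : Nat) : Int))).foldl max 0

lemma pvFoldl_max_le {l : List Int} {a b : Int} (ha : a ≤ b) (h : ∀ x ∈ l, x ≤ b) :
    l.foldl max a ≤ b := by
  induction l generalizing a with
  | nil => exact ha
  | cons x xs ih =>
    exact ih (max_le ha (h x (by simp))) (fun y hy => h y (by simp [hy]))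

lemma pvle_Mv (u : List Char) (k : Char) (hk : k ∈ u) : ((u.count k : Nat) : Int) ≤ pvMv u :=
  (PySem.List.le_foldl_max _ 0).2 _ (List.mem_map_of_mem ((PySem.Set.mem_ofList u k).mpr hk))

lemma pvMv_nonneg (u : List Char) : 0 ≤ pvMv u := (PySem.List.le_foldl_max _ 0).1

lemma pvMv_le {u : List Char} {b : Int} (hb : 0 ≤ b)
    (h : ∀ k ∈ u, ((u.count k : Nat) : Int) ≤ b) : pvMv u ≤ b := by
  refine pvFoldl_max_le hb ?_
  intro x hx
  obtain ⟨k, hk, rfl⟩ := List.mem_map.mp hx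
  exact h k ((PySem.Set.mem_ofList u k).mp hk)

lemma pvMv_step (t : List Char) (c : Char) :
    pvMv (t ++ [c]) = max (pvMv t) ((t.count c : Nat) + 1) := by
  apply le_antisymm
  · refine pvMv_le (le_trans (by positivity) (le_max_right _ _)) ?_
    intro k hk
    by_cases hkc : k = c
    · subst hkc
      have h1 : (t ++ [k]).count k = t.count k + 1 := by
        simp [List.count_append]
      rw [h1]; push_cast; exact le_max_right _ _
    · have hkt : k ∈ t := by
        rcases List.mem_append.mp hk with h | h
        · exact h
        · simp at h; exact absurd h hkc
      have h1 : (t ++ [c]).count k = t.count k := by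
        simp [List.count_append, Ne.symm hkc]
      rw [h1]
      exact le_trans (pvle_Mv t k hkt) (le_max_left _ _)
  · apply max_le
    · refine pvMv_le (pvMv_nonneg _) ?_
      intro k hk
      calc ((t.count k : Nat) : Int) ≤ ((t ++ [c]).count k : Nat) := by
            simp [List.count_append]
        _ ≤ pvMv (t ++ [c]) := pvle_Mv _ k (by simp [hk])
    · have h2 : ((t.count c : Nat) : Int) + 1 = (((t ++ [c]).count c : Nat) : Int) := by
        simp
      rw [h2]
      exact pvle_Mv _ c (by simp)

lemma pvCounter_step (t : List Char) (c : Char) :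
    (PySem.Dict.counter t).insert c ((PySem.Dict.counter t).getD c 0 + 1)
      = PySem.Dict.counter (t ++ [c]) := by
  rw [← PySem.Dict.foldl_insert_getD_add_one_eq_counter t,
      ← PySem.Dict.foldl_insert_getD_add_one_eq_counter (t ++ [c]), List.foldl_append]
  rfl

lemma pvOfList_append (t : List Char) (c : Char) :
    PySem.Set.ofList (t ++ [c])
      = if c ∈ t then PySem.Set.ofList t else PySem.Set.ofList t ++ [c] := by
  rw [PySem.Set.ofList_eq_foldl, List.foldl_append, ← PySem.Set.ofList_eq_foldl]
  show PySem.Set.add _ c = _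
  simp [PySem.Set.add, PySem.Set.contains]

lemma pvSum_le {vs : List Int} {M : Int} (h : ∀ v ∈ vs, v ≤ M) :
    vs.sum ≤ M * vs.length := by
  induction vs with
  | nil => simp
  | cons x xs ih =>
    have hx := h x (by simp)
    have hxs := ih (fun v hv => h v (by simp [hv]))
    simp only [List.sum_cons, List.length_cons]
    push_cast
    nlinarith

lemma pvSum_eq_forall {vs : List Int} {M : Int} (h : ∀ v ∈ vs, v ≤ M)
    (hs : vs.sum = M * vs.length) : ∀ v ∈ vs, v = M := by
  induction vs with
  | nil => simp
  | cons x xs ih =>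
    have hx := h x (by simp)
    have hle : xs.sum ≤ M * xs.length := pvSum_le (fun v hv => h v (by simp [hv]))
    simp only [List.sum_cons, List.length_cons] at hs
    have hMl : (M * (xs.length + 1) : Int) = M * xs.length + M := by ring
    push_cast at hs
    rw [hMl] at hs
    have hxM : x = M := by omega
    have hrest := ih (fun v hv => h v (by simp [hv])) (by omega)
    intro v hv
    rcases List.mem_cons.mp hv with rfl | hv
    · exact hxM
    · exact hrest v hv

lemma pvSingleton {l : List Int} {a : Int} (hn : l.Nodup) (h1 : a ∈ l)
    (h2 : ∀ b ∈ l, b = a) : l = [a] := by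
  cases l with
  | nil => simp at h1
  | cons x xs =>
    have hx : x = a := h2 x (by simp)
    cases xs with
    | nil => simp [hx]
    | cons y ys =>
      have hy : y = a := h2 y (by simp)
      rw [List.nodup_cons] at hn
      exact absurd (by simp [hx, hy] : x ∈ y :: ys) hn.1

lemma pvAllEq_core (vs : List Int) (hne : vs ≠ []) (hpos : ∀ v ∈ vs, 1 ≤ v) :
    (PySem.Set.ofList vs).length = 1 ↔ vs.foldl max 0 * vs.length = vs.sum := by
  have hub := (PySem.List.le_foldl_max vs (0 : Int)).2
  constructor
  · intro h
    obtain ⟨a, ha⟩ := List.length_eq_one_iff.mp h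
    have hmem : ∀ b ∈ vs, b = a := by
      intro b hb
      have hb' : b ∈ PySem.Set.ofList vs := (PySem.Set.mem_ofList vs b).mpr hb
      rw [ha] at hb'; simpa using hb'
    have hane : a ∈ vs := by
      cases vs with
      | nil => exact absurd rfl hne
      | cons x xs =>
        have hx := hmem x (by simp)
        simp [← hx]
    have hM : vs.foldl max 0 = a := by
      apply le_antisymm
      · have h0a : (0 : Int) ≤ a := le_trans (by norm_num) (hpos a hane)
        calc vs.foldl max 0 ≤ max 0 a := by
              apply pvFoldl_max_le (le_max_left _ _)
              intro x hx; rw [hmem x hx]; exact le_max_right _ _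
          _ = a := max_eq_right h0a
      · exact hub a hane
    rw [hM]
    have hsum := List.sum_eq_card_nsmul vs a hmem
    simp [hsum]; ring
  · intro h
    have hall : ∀ v ∈ vs, v = vs.foldl max 0 := pvSum_eq_forall hub h.symm
    have hane : vs.foldl max 0 ∈ vs := by
      cases vs with
      | nil => exact absurd rfl hne
      | cons x xs =>
        have hx := hall x (by simp)
        simp [← hx]
    rw [pvSingleton (PySem.Set.nodup_ofList vs)
      ((PySem.Set.mem_ofList _ _).mpr hane)
      (fun b hb => hall b ((PySem.Set.mem_ofList _ _).mp hb))]
    rfl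

lemma pvValues_counter (u : List Char) : (PySem.Dict.counter u).values
    = (PySem.Set.ofList u).map (fun k => ((u.count k : Nat) : Int)) := by
  show (PySem.Dict.counter u).items.map Prod.snd = _
  rw [PySem.Dict.items_counter, List.map_map]
  rfl

lemma pvSum_counts (u : List Char) : ((PySem.Set.ofList u).map (fun k => u.count k)).sum = u.length := by
  have hperm : (PySem.Set.ofList u).Perm u.dedup := by
    rw [List.perm_ext_iff_of_nodup (PySem.Set.nodup_ofList u) (List.nodup_dedup u)]
    intro a
    rw [PySem.Set.mem_ofList, List.mem_dedup]
  calc ((PySem.Set.ofList u).map (fun k => u.count k)).sum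
      = ((u.dedup).map (fun k => u.count k)).sum := (hperm.map _).sum_eq
    _ = u.length := List.sum_map_count_dedup_eq_length u

lemma pvAllEq_iff (u : List Char) (hne : u ≠ []) :
    ((PySem.Set.ofList ((PySem.Dict.counter u).values)).length = 1)
      ↔ pvMv u * ((PySem.Set.ofList u).length : Int) = (u.length : Int) := by
  rw [pvValues_counter]
  set vs := (PySem.Set.ofList u).map (fun k => ((u.count k : Nat) : Int)) with hvs
  have hpos : ∀ v ∈ vs, 1 ≤ v := by
    intro v hv
    obtain ⟨k, hk, rfl⟩ := List.mem_map.mp hv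
    have hku : k ∈ u := (PySem.Set.mem_ofList u k).mp hk
    have : 0 < u.count k := List.count_pos_iff.mpr hku
    exact_mod_cast this
  have hne' : vs ≠ [] := by
    obtain ⟨c, hc⟩ := List.exists_mem_of_ne_nil u hne
    have : ((u.count c : Nat) : Int) ∈ vs :=
      List.mem_map_of_mem ((PySem.Set.mem_ofList u c).mpr hc)
    exact List.ne_nil_of_mem this
  rw [pvAllEq_core vs hne' hpos]
  have h2 : (vs.length : Int) = ((PySem.Set.ofList u).length : Int) := by
    rw [hvs, List.length_map]
  have h3 : vs.sum = (u.length : Int) := by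
    calc vs.sum = (((PySem.Set.ofList u).map (fun k => u.count k)).map (fun n : Nat => (n : Int))).sum := by
          rw [List.map_map]; rfl
      _ = ((((PySem.Set.ofList u).map (fun k => u.count k)).sum : Nat) : Int) :=
          (Nat.cast_list_sum _).symm
      _ = (u.length : Int) := by rw [pvSum_counts]
  rw [h2, h3]
  rfl

lemma pvIfMax (a b : Int) : (if a < b then b else a) = max a b := by
  rcases lt_or_ge a b with h | h
  · simp [h, max_eq_right h.le]
  · simp [not_lt.mpr h, max_eq_left h]

-- the ghost invariant relating A's set of substrings to B's trie:
-- labels assigns each allocated node id its path string; labels are distinct;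
-- trie edges and parents are consistent; A's set corresponds to B's valid ids.
def pvInv (uset : PySem.Set String) (trie : PySem.Dict (Int × Char) Int)
    (nodes : Int) (valid : PySem.Set Int) (labels : List (List Char)) : Prop :=
  (labels.length : Int) = nodes ∧
  labels.Nodup ∧
  labels[0]? = some [] ∧
  (∀ k c m, ((k, c), m) ∈ trie.items →
     0 ≤ k ∧ 0 ≤ m ∧ ∃ tk, labels[k.toNat]? = some tk ∧ labels[m.toNat]? = some (tk ++ [c])) ∧
  (∀ mn : Nat, 1 ≤ mn → mn < labels.length → ∃ k c, ((k, c), (mn : Int)) ∈ trie.items) ∧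
  trie.keys.Nodup ∧
  (∀ m ∈ valid, 0 ≤ m ∧ m.toNat < labels.length) ∧
  (∀ w : String, w ∈ uset ↔ ∃ m ∈ valid, labels[m.toNat]? = some w.toList) ∧
  uset.length = valid.length

lemma pvLt_of_getElem? {α : Type} {l : List α} {i : Nat} {a : α} (h : l[i]? = some a) :
    i < l.length := (List.getElem?_eq_some_iff.mp h).1

lemma pvConcat_inj {t tk : List Char} {a b : Char} (h : t ++ [a] = tk ++ [b]) :
    t = tk ∧ a = b := by
  have h2 := congrArg List.reverse h
  simp at h2
  exact ⟨by simpa using congrArg List.reverse h2.2, h2.1⟩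

-- adding one valid substring on both sides preserves the invariant
lemma pvInv_add {uset : PySem.Set String} {trie : PySem.Dict (Int × Char) Int}
    {nodes : Int} {valid : PySem.Set Int} {labels : List (List Char)}
    (w : String) (m : Int)
    (hInv : pvInv uset trie nodes valid labels) (hm0 : 0 ≤ m)
    (hml : labels[m.toNat]? = some w.toList) :
    pvInv (uset.add w) trie nodes (valid.add m) labels := by
  obtain ⟨h1, h2, h3, h4, h5, h6, h7, h8, h9⟩ := hInv
  have hmlt : m.toNat < labels.length := pvLt_of_getElem? hml
  have hwm : w ∈ uset ↔ m ∈ valid := by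
    constructor
    · intro hw
      obtain ⟨m', hm'v, hm'l⟩ := (h8 w).mp hw
      have hm'lt : m'.toNat < labels.length := pvLt_of_getElem? hm'l
      have : m'.toNat = m.toNat :=
        List.getElem?_inj hm'lt h2 (by rw [hm'l, hml])
      have hm'0 := (h7 m' hm'v).1
      have : m' = m := by omega
      exact this ▸ hm'v
    · intro hm
      exact (h8 w).mpr ⟨m, hm, hml⟩
  refine ⟨h1, h2, h3, h4, h5, h6, ?_, ?_, ?_⟩
  · intro m' hm'
    rcases (PySem.Set.mem_add _ _ _).mp hm' with hm' | rfl
    · exact h7 m' hm'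
    · exact ⟨hm0, hmlt⟩
  · intro w'
    constructor
    · intro hw'
      rcases (PySem.Set.mem_add _ _ _).mp hw' with hw' | rfl
      · obtain ⟨m', hm'v, hm'l⟩ := (h8 w').mp hw'
        exact ⟨m', (PySem.Set.mem_add _ _ _).mpr (Or.inl hm'v), hm'l⟩
      · exact ⟨m, (PySem.Set.mem_add _ _ _).mpr (Or.inr rfl), hml⟩
    · rintro ⟨m', hm'v, hm'l⟩
      rcases (PySem.Set.mem_add _ _ _).mp hm'v with hm'v | rfl
      · exact (PySem.Set.mem_add _ _ _).mpr (Or.inl ((h8 w').mpr ⟨m', hm'v, hm'l⟩))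
      · have hww' : w'.toList = w.toList := Option.some_injective _ (hm'l.symm.trans hml)
        have : w' = w := String.toList_inj.mp hww'
        exact (PySem.Set.mem_add _ _ _).mpr (Or.inr this)
  · by_cases hmv : m ∈ valid
    · rw [PySem.Set.add_of_mem hmv, PySem.Set.add_of_mem (hwm.mpr hmv)]
      exact h9
    · rw [PySem.Set.add_of_not_mem hmv,
          PySem.Set.add_of_not_mem (fun hw => hmv (hwm.mp hw))]
      simp [h9]

-- a missing edge means the extended string is not yet a node label
lemma pvFresh {trie : PySem.Dict (Int × Char) Int} {labels : List (List Char)}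
    (node : Int) (ch : Char) (t : List Char)
    (h2 : labels.Nodup) (h3 : labels[0]? = some [])
    (h4 : ∀ k c m, ((k, c), m) ∈ trie.items →
       0 ≤ k ∧ 0 ≤ m ∧ ∃ tk, labels[k.toNat]? = some tk ∧ labels[m.toNat]? = some (tk ++ [c]))
    (h5 : ∀ mn : Nat, 1 ≤ mn → mn < labels.length → ∃ k c, ((k, c), (mn : Int)) ∈ trie.items)
    (h6 : trie.keys.Nodup)
    (hn0 : 0 ≤ node) (hlab : labels[node.toNat]? = some t)
    (hlook : trie.get? (node, ch) = none) :
    t ++ [ch] ∉ labels := by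
  intro hmem
  obtain ⟨mn, hmn⟩ := List.mem_iff_getElem?.mp hmem
  have hmnlt : mn < labels.length := pvLt_of_getElem? hmn
  have hmn1 : 1 ≤ mn := by
    rcases Nat.eq_zero_or_pos mn with rfl | h
    · rw [h3] at hmn
      simp at hmn
    · exact h
  obtain ⟨k, c', hkc⟩ := h5 mn hmn1 hmnlt
  obtain ⟨hk0, _, tk, hkl, hml⟩ := h4 k c' (mn : Int) hkc
  have hmn' : ((mn : Int)).toNat = mn := by omega
  rw [hmn'] at hml
  have heq : tk ++ [c'] = t ++ [ch] := Option.some_injective _ (hml.symm.trans hmn)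
  obtain ⟨htk, hc⟩ := pvConcat_inj heq
  subst htk hc
  have hklt : k.toNat < labels.length := pvLt_of_getElem? hkl
  have hkn : k.toNat = node.toNat :=
    List.getElem?_inj hklt h2 (by rw [hkl, hlab])
  have : k = node := by omega
  subst this
  rw [PySem.Dict.get?_of_mem_items _ hkc h6] at hlook
  simp at hlook

-- allocating a fresh node preserves the invariant, with the label list extended
lemma pvInv_grow {uset : PySem.Set String} {trie : PySem.Dict (Int × Char) Int}
    {nodes : Int} {valid : PySem.Set Int} {labels : List (List Char)}
    (node : Int) (ch : Char) (t : List Char)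
    (hInv : pvInv uset trie nodes valid labels) (hn0 : 0 ≤ node)
    (hlab : labels[node.toNat]? = some t)
    (hlook : trie.get? (node, ch) = none) :
    pvInv uset (trie.insert (node, ch) nodes) (nodes + 1) valid (labels ++ [t ++ [ch]]) := by
  obtain ⟨h1, h2, h3, h4, h5, h6, h7, h8, h9⟩ := hInv
  have hfresh : t ++ [ch] ∉ labels := pvFresh node ch t h2 h3 h4 h5 h6 hn0 hlab hlook
  have hnc : trie.contains (node, ch) = false := by
    rw [PySem.Dict.contains_eq_isSome_get?, hlook]
    rfl
  have hitems : (trie.insert (node, ch) nodes).items = trie.items ++ [((node, ch), nodes)] :=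
    PySem.Dict.items_insert_of_not_contains _ _ hnc
  have hkeys : (trie.insert (node, ch) nodes).keys = trie.keys ++ [(node, ch)] :=
    PySem.Dict.keys_insert_of_not_contains _ _ hnc
  have hnodes0 : 0 ≤ nodes := by omega
  have hnodesNat : nodes.toNat = labels.length := by omega
  have hnlt : node.toNat < labels.length := pvLt_of_getElem? hlab
  have h0lt : 0 < labels.length := pvLt_of_getElem? h3
  have hlabnew : (labels ++ [t ++ [ch]])[nodes.toNat]? = some (t ++ [ch]) := by
    rw [hnodesNat]
    exact List.getElem?_concat_length ..
  refine ⟨?_, ?_, ?_, ?_, ?_, ?_, ?_, ?_, h9⟩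
  · simp
    omega
  · rw [List.nodup_append]
    exact ⟨h2, List.nodup_singleton _,
      fun a ha b hb => by
        rw [List.mem_singleton] at hb
        subst hb
        exact fun hab => hfresh (hab ▸ ha)⟩
  · rw [List.getElem?_append_left h0lt]
    exact h3
  · intro k c m hm
    rw [hitems] at hm
    rcases List.mem_append.mp hm with hm | hm
    · obtain ⟨hk0, hm0, tk, hkl, hml⟩ := h4 k c m hm
      exact ⟨hk0, hm0, tk,
        by rw [List.getElem?_append_left (pvLt_of_getElem? hkl)]; exact hkl,
        by rw [List.getElem?_append_left (pvLt_of_getElem? hml)]; exact hml⟩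
    · rw [List.mem_singleton] at hm
      have hk : k = node := congrArg (fun p => p.1.1) hm
      have hc : c = ch := congrArg (fun p => p.1.2) hm
      have hmn : m = nodes := congrArg (fun p => p.2) hm
      subst hk hc hmn
      exact ⟨hn0, hnodes0, t,
        by rw [List.getElem?_append_left hnlt]; exact hlab, hlabnew⟩
  · intro mn hmn1 hmnlt
    simp only [List.length_append, List.length_cons, List.length_nil] at hmnlt
    rcases Nat.lt_or_ge mn labels.length with hlt | hge
    · obtain ⟨k, c, hm⟩ := h5 mn hmn1 hlt
      exact ⟨k, c, by rw [hitems]; exact List.mem_append.mpr (Or.inl hm)⟩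
    · have hmn : mn = labels.length := by omega
      refine ⟨node, ch, ?_⟩
      rw [hitems]
      refine List.mem_append.mpr (Or.inr ?_)
      rw [List.mem_singleton]
      have : (mn : Int) = nodes := by omega
      rw [this]
  · rw [hkeys, List.nodup_append]
    refine ⟨h6, List.nodup_singleton _, fun a ha b hb => ?_⟩
    rw [List.mem_singleton] at hb
    subst hb
    intro hab
    subst hab
    rw [PySem.Dict.get?_eq_none_iff_not_mem_keys] at hlook
    exact hlook ha
  · intro m hm
    obtain ⟨hm0, hmlt⟩ := h7 m hm
    exact ⟨hm0, by simp; omega⟩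
  · intro w
    rw [h8 w]
    constructor
    · rintro ⟨m, hmv, hml⟩
      exact ⟨m, hmv,
        by rw [List.getElem?_append_left (pvLt_of_getElem? hml)]; exact hml⟩
    · rintro ⟨m, hmv, hml⟩
      have hmlt := (h7 m hmv).2
      rw [List.getElem?_append_left hmlt] at hml
      exact ⟨m, hmv, hml⟩

-- the slice A adds is exactly the current path string
lemma pvSlice_toList (s : String) (i : Nat) (t r' : List Char) (ch : Char)
    (hsplit : t ++ ch :: r' = s.toList.drop i) :
    (PySem.Str.slice s (some ((i : Nat) : Int)) (some (((i + t.length : Nat) : Int) + 1))).toList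
      = t ++ [ch] := by
  rw [PySem.Str.toList_slice, PySem.Chars.slice_eq_listSlice]
  have h1 : (((i + t.length : Nat) : Int) + 1) = ((i + t.length + 1 : Nat) : Int) := by
    push_cast; ring
  rw [h1, PySem.List.slice_natCast]
  have h2 : i + t.length + 1 - i = t.length + 1 := by omega
  rw [h2, ← hsplit]
  simp [List.take_append]

-- lockstep simulation of the inner loops: A's substring additions match B's node markings
lemma pvInner_eq (s : String) (i : Nat) (hi : i ≤ s.toList.length) :
    ∀ (r t : List Char) (uset : PySem.Set String) (trie : PySem.Dict (Int × Char) Int)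
      (nodes node : Int) (valid : PySem.Set Int) (labels : List (List Char)),
      t ++ r = s.toList.drop i →
      pvInv uset trie nodes valid labels →
      0 ≤ node →
      labels[node.toNat]? = some t →
      ∃ labels',
        pvInv
          (((PySem.List.pyRange ((i : Int) + (t.length : Int)) (s.toList.length : Int)).foldl
            (pvAInner s (i : Int)) (PySem.Dict.counter t, uset)).2)
          (((PySem.List.pyRange ((i : Int) + (t.length : Int)) (s.toList.length : Int)).foldl
            (pvBInner s (i : Int))
            (PySem.Dict.counter t, pvMv t, ((PySem.Set.ofList t).length : Int),
              trie, nodes, valid, node)).2.2.2.1)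
          (((PySem.List.pyRange ((i : Int) + (t.length : Int)) (s.toList.length : Int)).foldl
            (pvBInner s (i : Int))
            (PySem.Dict.counter t, pvMv t, ((PySem.Set.ofList t).length : Int),
              trie, nodes, valid, node)).2.2.2.2.1)
          (((PySem.List.pyRange ((i : Int) + (t.length : Int)) (s.toList.length : Int)).foldl
            (pvBInner s (i : Int))
            (PySem.Dict.counter t, pvMv t, ((PySem.Set.ofList t).length : Int),
              trie, nodes, valid, node)).2.2.2.2.2.1)
          labels' := by
  intro r
  induction r with
  | nil =>
    intro t uset trie nodes node valid labels hsplit hInv hn0 hlab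
    rw [List.append_nil] at hsplit
    have h1 : t.length = s.toList.length - i := by rw [hsplit, List.length_drop]
    have h2 : ((i : Int) + (t.length : Int)) = (s.toList.length : Int) := by
      rw [h1]; omega
    rw [h2, PySem.List.pyRange_one_eq_nil (le_refl _)]
    exact ⟨labels, hInv⟩
  | cons ch r' ih =>
    intro t uset trie nodes node valid labels hsplit hInv hn0 hlab
    have hlen := congrArg List.length hsplit
    simp only [List.length_append, List.length_cons, List.length_drop] at hlen
    have hJlt : i + t.length < s.toList.length := by omega
    have hJ : ((i : Int) + (t.length : Int)) = ((i + t.length : Nat) : Int) := by push_cast; ring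
    rw [hJ, PySem.List.pyRange_one_cons (by exact_mod_cast hJlt)]
    have hget : PySem.Str.pyGet? s ((i + t.length : Nat) : Int) = some ch := by
      rw [PySem.Str.pyGet?_natCast]
      have h1 : s.toList[i + t.length]? = (s.toList.drop i)[t.length]? := by
        rw [List.getElem?_drop]
      rw [h1, ← hsplit]; simp
    simp only [List.foldl_cons]
    -- evaluate one step of each loop body
    rw [show pvAInner s (i : Int) (PySem.Dict.counter t, uset) ((i + t.length : Nat) : Int)
        = (if (PySem.Set.ofList (PySem.Dict.counter (t ++ [ch])).values).length == 1 then
            (PySem.Dict.counter (t ++ [ch]),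
              uset.add (PySem.Str.slice s (some (i : Int)) (some (((i + t.length : Nat) : Int) + 1))))
          else (PySem.Dict.counter (t ++ [ch]), uset)) from by
      simp only [pvAInner, hget]
      rw [pvCounter_step]]
    have hm : (if pvMv t < ((t.count ch : Nat) : Int) + 1 then ((t.count ch : Nat) : Int) + 1 else pvMv t)
        = pvMv (t ++ [ch]) := by
      rw [pvIfMax, pvMv_step]
    have hd : (if ((((t.count ch : Nat) : Int) + 1) == 1) = true
          then ((List.length (PySem.Set.ofList t) : Nat) : Int) + 1
          else ((List.length (PySem.Set.ofList t) : Nat) : Int))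
        = ((List.length (PySem.Set.ofList (t ++ [ch])) : Nat) : Int) := by
      by_cases hmem : ch ∈ t
      · have hne1 : t.count ch ≠ 0 := by simp [List.count_eq_zero]; exact hmem
        have hb : ((((t.count ch : Nat) : Int) + 1) == 1) = false := by
          simp; omega
        simp [hb, pvOfList_append, hmem]
      · have hc0 : t.count ch = 0 := List.count_eq_zero.mpr hmem
        simp [hc0, pvOfList_append, hmem]
    have hcondIff : ((PySem.Set.ofList (PySem.Dict.counter (t ++ [ch])).values).length == 1)
        = (pvMv (t ++ [ch]) * ((List.length (PySem.Set.ofList (t ++ [ch])) : Nat) : Int)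
            == ((i + t.length : Nat) : Int) - (i : Int) + 1) := by
      rw [Bool.eq_iff_iff]
      simp only [beq_iff_eq]
      have hnum : ((i + t.length : Nat) : Int) - (i : Int) + 1 = (((t ++ [ch]).length : Nat) : Int) := by
        simp only [List.length_append, List.length_cons, List.length_nil]
        omega
      rw [hnum]
      exact pvAllEq_iff (t ++ [ch]) (by simp)
    have hsplit' : (t ++ [ch]) ++ r' = s.toList.drop i := by rw [← hsplit]; simp
    have hIdx : (((i + t.length : Nat) : Int) + 1) = ((i : Int) + (((t ++ [ch]).length : Nat) : Int)) := by
      simp only [List.length_append, List.length_cons, List.length_nil]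
      omega
    have hwtl : (PySem.Str.slice s (some (i : Int)) (some (((i + t.length : Nat) : Int) + 1))).toList
        = t ++ [ch] := pvSlice_toList s i t r' ch hsplit
    obtain ⟨h1, h2, h3, h4, h5, h6, h7, h8, h9⟩ := hInv
    cases hlook : trie.get? (node, ch) with
    | some m =>
      have hmem := PySem.Dict.mem_items_of_get?_eq_some _ hlook
      obtain ⟨_, hm0, tk, hkl, hml⟩ := h4 node ch m hmem
      have htk : tk = t := Option.some_injective _ (hkl.symm.trans hlab)
      rw [htk] at hml
      rw [show pvBInner s (i : Int)
            (PySem.Dict.counter t, pvMv t, ((PySem.Set.ofList t).length : Int),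
              trie, nodes, valid, node) ((i + t.length : Nat) : Int)
          = (if (pvMv (t ++ [ch]) * ((List.length (PySem.Set.ofList (t ++ [ch])) : Nat) : Int)
                == ((i + t.length : Nat) : Int) - (i : Int) + 1) then
              (PySem.Dict.counter (t ++ [ch]), pvMv (t ++ [ch]),
                ((PySem.Set.ofList (t ++ [ch])).length : Int), trie, nodes, valid.add m, m)
            else (PySem.Dict.counter (t ++ [ch]), pvMv (t ++ [ch]),
                ((PySem.Set.ofList (t ++ [ch])).length : Int), trie, nodes, valid, m)) from by
        simp only [pvBInner, hget, hlook]
        rw [pvCounter_step, PySem.Dict.getD_counter, hm, hd]]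
      rw [hcondIff]
      rw [hIdx] at hwtl ⊢
      split_ifs with hC
      · exact ih (t ++ [ch]) _ _ _ _ _ _ hsplit'
          (pvInv_add _ m ⟨h1, h2, h3, h4, h5, h6, h7, h8, h9⟩ hm0 (by rw [hwtl]; exact hml))
          hm0 hml
      · exact ih (t ++ [ch]) _ _ _ _ _ _ hsplit'
          ⟨h1, h2, h3, h4, h5, h6, h7, h8, h9⟩ hm0 hml
    | none =>
      have hInv' := pvInv_grow node ch t ⟨h1, h2, h3, h4, h5, h6, h7, h8, h9⟩ hn0 hlab hlook
      have hnodes0 : 0 ≤ nodes := by omega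
      have hlabnew : (labels ++ [t ++ [ch]])[nodes.toNat]? = some (t ++ [ch]) := by
        have : nodes.toNat = labels.length := by omega
        rw [this]
        exact List.getElem?_concat_length ..
      rw [show pvBInner s (i : Int)
            (PySem.Dict.counter t, pvMv t, ((PySem.Set.ofList t).length : Int),
              trie, nodes, valid, node) ((i + t.length : Nat) : Int)
          = (if (pvMv (t ++ [ch]) * ((List.length (PySem.Set.ofList (t ++ [ch])) : Nat) : Int)
                == ((i + t.length : Nat) : Int) - (i : Int) + 1) then
              (PySem.Dict.counter (t ++ [ch]), pvMv (t ++ [ch]),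
                ((PySem.Set.ofList (t ++ [ch])).length : Int),
                trie.insert (node, ch) nodes, nodes + 1, valid.add nodes, nodes)
            else (PySem.Dict.counter (t ++ [ch]), pvMv (t ++ [ch]),
                ((PySem.Set.ofList (t ++ [ch])).length : Int),
                trie.insert (node, ch) nodes, nodes + 1, valid, nodes)) from by
        simp only [pvBInner, hget, hlook]
        rw [pvCounter_step, PySem.Dict.getD_counter, hm, hd]]
      rw [hcondIff]
      rw [hIdx] at hwtl ⊢
      split_ifs with hC
      · exact ih (t ++ [ch]) _ _ _ _ _ _ hsplit'
          (pvInv_add _ nodes hInv' hnodes0 (by rw [hwtl]; exact hlabnew)) hnodes0 hlabnew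
      · exact ih (t ++ [ch]) _ _ _ _ _ _ hsplit' hInv' hnodes0 hlabnew

-- the outer loops in lockstep
lemma pvOuter_eq (s : String) :
    ∀ (is : List Int) (uset : PySem.Set String) (trie : PySem.Dict (Int × Char) Int)
      (nodes : Int) (valid : PySem.Set Int) (labels : List (List Char)),
      (∀ i ∈ is, 0 ≤ i ∧ i < (s.toList.length : Int)) →
      pvInv uset trie nodes valid labels →
      ∃ labels',
        pvInv
          (is.foldl (fun uset i =>
            ((PySem.List.pyRange i (s.toList.length : Int)).foldl (pvAInner s i)
              (PySem.Dict.empty, uset)).2) uset)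
          (is.foldl (pvBOuter s (s.toList.length : Int)) (trie, nodes, valid)).1
          (is.foldl (pvBOuter s (s.toList.length : Int)) (trie, nodes, valid)).2.1
          (is.foldl (pvBOuter s (s.toList.length : Int)) (trie, nodes, valid)).2.2
          labels' := by
  intro is
  induction is with
  | nil =>
    intro uset trie nodes valid labels _ hInv
    exact ⟨labels, hInv⟩
  | cons i is' ih =>
    intro uset trie nodes valid labels hbnd hInv
    obtain ⟨hi0, hilt⟩ := hbnd i (by simp)
    obtain ⟨k, rfl⟩ : ∃ k : Nat, (k : Int) = i := ⟨i.toNat, Int.toNat_of_nonneg hi0⟩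
    have hk : k ≤ s.toList.length := by exact_mod_cast hilt.le
    have hstep := pvInner_eq s k hk (s.toList.drop k) [] uset trie nodes 0 valid labels
      (by simp) hInv (le_refl 0) (by simpa using hInv.2.2.1)
    simp only [List.length_nil, Nat.cast_zero, add_zero] at hstep
    obtain ⟨labels'', hInv''⟩ := hstep
    simp only [List.foldl_cons]
    refine ih _ _ _ _ labels'' (fun j hj => hbnd j (by simp [hj])) ?_
    show pvInv
      (((PySem.List.pyRange (k : Int) (s.toList.length : Int)).foldl (pvAInner s (k : Int))
        (PySem.Dict.empty, uset)).2)
      (pvBOuter s (s.toList.length : Int) (trie, nodes, valid) (k : Int)).1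
      (pvBOuter s (s.toList.length : Int) (trie, nodes, valid) (k : Int)).2.1
      (pvBOuter s (s.toList.length : Int) (trie, nodes, valid) (k : Int)).2.2
      labels''
    exact hInv''

-- ===== VERDICT (by name: the statement is the Claim_ definition above) =====
theorem equalDigitFrequency_spec : Claim_equal_equalDigitFrequency := by
  intro s _
  unfold Spec_equalDigitFrequency equalDigitFrequency equalDigitFrequency_alt
  simp only [PySem.Str.len_eq]
  have hInit : pvInv PySem.Set.empty PySem.Dict.empty 1 PySem.Set.empty [[]] := by
    refine ⟨by norm_num, by simp, by simp, ?_, ?_, ?_, ?_, ?_, rfl⟩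
    · intro k c m hm
      simp [PySem.Dict.empty] at hm
    · intro mn h1 h2
      simp at h2
      omega
    · simp [PySem.Dict.empty, PySem.Dict.keys]
    · intro m hm
      simp [PySem.Set.empty] at hm
    · intro w
      simp [PySem.Set.empty]
  obtain ⟨labels', hFin⟩ := pvOuter_eq s (PySem.List.pyRange 0 (s.toList.length : Int))
    PySem.Set.empty PySem.Dict.empty 1 PySem.Set.empty [[]]
    (fun i hi => by
      obtain ⟨h0, h1⟩ := PySem.List.mem_pyRange_one.mp hi
      exact ⟨h0, h1⟩) hInit
  exact_mod_cast congrArg (fun n : Nat => (n : Int)) hFin.2.2.2.2.2.2.2.2
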